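-- pv_equiv track=rewrite | github.com/c0ntradicti0n/break-my-core | drums.py | time_add
-- ===== SOURCE A (Python) =====
-- def time_add(ll, pos=0):
--     rr = []
--     for l in ll:
--         r = []
--         for (tone_height, tone_length) in l:
--             r.append(
--                 (tone_height, tone_length + pos)
--             )
--             pos += tone_length
--         rr.append(r)
--     return rr
-- ===== SOURCE B (Python) =====
-- def time_add(ll, pos=0):
--     # Phase 1: build the offset table for every tone, in global order.
--     lengths = [tone_length for row in ll for (_, tone_length) in row]
--     offsets = []
--     cur = pos
--     for tl in lengths:
--         offsets.append(cur)
--         cur += tl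
--     # Phase 2: reshape, consuming one offset per tone.
--     it = iter(offsets)
--     return [[(th, tl + next(it)) for (th, tl) in row] for row in ll]
-- ===== Notes on version B (the rewrite author's own statement) =====
-- stated objective: alternative
-- what changed: B separates the computation into two phases: it first builds a flat prefix-offset table over all tone lengths starting at pos, then walks the nested structure a second time consuming one offset per tone, instead of A's single pass threading a running pos through nested loops.
import Mathlib
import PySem

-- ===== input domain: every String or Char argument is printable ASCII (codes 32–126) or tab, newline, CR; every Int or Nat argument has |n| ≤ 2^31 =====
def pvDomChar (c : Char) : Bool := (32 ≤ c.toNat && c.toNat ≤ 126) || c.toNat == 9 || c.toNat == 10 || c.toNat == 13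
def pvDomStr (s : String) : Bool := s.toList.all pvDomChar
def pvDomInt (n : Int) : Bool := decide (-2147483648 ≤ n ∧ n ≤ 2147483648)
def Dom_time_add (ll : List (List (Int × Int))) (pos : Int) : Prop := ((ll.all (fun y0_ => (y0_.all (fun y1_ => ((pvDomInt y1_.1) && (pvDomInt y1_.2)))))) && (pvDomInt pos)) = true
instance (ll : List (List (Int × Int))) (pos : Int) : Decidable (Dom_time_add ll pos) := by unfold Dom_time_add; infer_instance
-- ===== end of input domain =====

-- B separates the cumulative-offset computation (a flat prefix table) from a second
-- reshaping pass over the nested structure; same cost, different decomposition (no speed claim).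
-- ===== PORT A =====
def time_add (ll : List (List (Int × Int))) (pos : Int) : List (List (Int × Int)) :=
  (ll.foldl (fun (st : List (List (Int × Int)) × Int) l =>
      let inner := l.foldl (fun (st2 : List (Int × Int) × Int) p =>
          (st2.1 ++ [(p.1, p.2 + st2.2)], st2.2 + p.2)) ([], st.2)
      (st.1 ++ [inner.1], inner.2)) ([], pos)).1

-- ===== PORT B =====
-- offsets: the loop "for tl in lengths: offsets.append(cur); cur += tl"
def pvOffsets (lengths : List Int) (pos : Int) : List Int :=
  (lengths.foldl (fun (st : List Int × Int) tl => (st.1 ++ [st.2], st.2 + tl)) ([], pos)).1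

-- reshape a row, consuming one offset per tone (next(it)); headD 0 is never hit in use
def pvReshapeRow : List (Int × Int) → List Int → (List (Int × Int) × List Int)
  | [], offs => ([], offs)
  | p :: ps, offs =>
    let o := offs.headD 0
    let rest := pvReshapeRow ps offs.tail
    ((p.1, p.2 + o) :: rest.1, rest.2)

def pvReshape : List (List (Int × Int)) → List Int → List (List (Int × Int))
  | [], _ => []
  | row :: rows, offs =>
    let r := pvReshapeRow row offs
    r.1 :: pvReshape rows r.2

def time_add_alt (ll : List (List (Int × Int))) (pos : Int) : List (List (Int × Int)) :=
  pvReshape ll (pvOffsets (ll.flatMap (fun row => row.map Prod.snd)) pos)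

-- ===== PRECONDITION & SPEC =====
def Spec_time_add (ll : List (List (Int × Int))) (pos : Int) (out : List (List (Int × Int))) : Prop := out = time_add_alt ll pos
instance (ll : List (List (Int × Int))) (pos : Int) (out : List (List (Int × Int))) : Decidable (Spec_time_add ll pos out) := by unfold Spec_time_add; infer_instance

-- ===== CLAIM (what is proved, stated in full; the proofs are below) =====
def Claim_equal_time_add : Prop := ∀ (ll : List (List (Int × Int))) (pos : Int), Dom_time_add ll pos → Spec_time_add ll pos (time_add ll pos)

-- ===== LEMMAS AND PROOFS =====

-- common recursive characterisation of the traversal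
def pvRowSpec : List (Int × Int) → Int → (List (Int × Int) × Int)
  | [], pos => ([], pos)
  | p :: ps, pos =>
    let rest := pvRowSpec ps (pos + p.2)
    ((p.1, p.2 + pos) :: rest.1, rest.2)

def pvSpec : List (List (Int × Int)) → Int → List (List (Int × Int))
  | [], _ => []
  | row :: rows, pos =>
    let r := pvRowSpec row pos
    r.1 :: pvSpec rows r.2

-- recursive form of the offsets table
def pvOffsR : List Int → Int → List Int
  | [], _ => []
  | t :: ts, pos => pos :: pvOffsR ts (pos + t)

theorem innerA (l : List (Int × Int)) : ∀ (acc : List (Int × Int)) (pos : Int),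
    l.foldl (fun (st2 : List (Int × Int) × Int) p =>
        (st2.1 ++ [(p.1, p.2 + st2.2)], st2.2 + p.2)) (acc, pos)
      = (acc ++ (pvRowSpec l pos).1, (pvRowSpec l pos).2) := by
  induction l with
  | nil => intro acc pos; simp [pvRowSpec]
  | cons p ps ih => intro acc pos; simp [List.foldl, pvRowSpec, ih]

theorem outerA' (ll : List (List (Int × Int))) : ∀ (acc : List (List (Int × Int))) (pos : Int),
    (ll.foldl (fun (st : List (List (Int × Int)) × Int) l =>
        let inner := l.foldl (fun (st2 : List (Int × Int) × Int) p =>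
            (st2.1 ++ [(p.1, p.2 + st2.2)], st2.2 + p.2)) ([], st.2)
        (st.1 ++ [inner.1], inner.2)) (acc, pos)).1
      = acc ++ pvSpec ll pos := by
  induction ll with
  | nil => intro acc pos; simp [pvSpec]
  | cons row rows ih =>
    intro acc pos
    simp only [List.foldl_cons, innerA] at ih ⊢
    rw [ih]
    simp [pvSpec]

theorem offsets_eq (ts : List Int) : ∀ (acc : List Int) (pos : Int),
    (ts.foldl (fun (st : List Int × Int) tl => (st.1 ++ [st.2], st.2 + tl)) (acc, pos)).1
      = acc ++ pvOffsR ts pos := by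
  induction ts with
  | nil => intro acc pos; simp [pvOffsR]
  | cons t ts ih => intro acc pos; simp [List.foldl, pvOffsR, ih]

theorem reshapeRow_eq (row : List (Int × Int)) : ∀ (rest : List Int) (pos : Int),
    pvReshapeRow row (pvOffsR (row.map Prod.snd ++ rest) pos)
      = ((pvRowSpec row pos).1, pvOffsR rest (pvRowSpec row pos).2) := by
  induction row with
  | nil => intro rest pos; simp [pvReshapeRow, pvRowSpec]
  | cons p ps ih =>
    intro rest pos
    simp [pvReshapeRow, pvOffsR, pvRowSpec, ih]

theorem reshape_eq (ll : List (List (Int × Int))) : ∀ (pos : Int),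
    pvReshape ll (pvOffsR (ll.flatMap (fun row => row.map Prod.snd)) pos) = pvSpec ll pos := by
  induction ll with
  | nil => intro pos; simp [pvReshape, pvSpec]
  | cons row rows ih =>
    intro pos
    simp only [List.flatMap_cons, pvReshape, reshapeRow_eq, pvSpec, ih]

-- ===== VERDICT (by name: the statement is the Claim_ definition above) =====
theorem time_add_spec : Claim_equal_time_add := by
  intro ll pos _
  unfold Spec_time_add time_add time_add_alt pvOffsets
  rw [outerA', offsets_eq]
  simp only [List.nil_append]
  rw [reshape_eq]
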